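-- pv_equiv track=rewrite | github.com/yanxiangtianji/Neuron | dataAnalysis/activation.py | cal_dif_pair
-- ===== SOURCE A (Python) =====
-- def cal_dif_pair(line_from,line_to,n_dig=4):
-- 	res=[]
-- 	length_f=len(line_from)
-- 	length_t=len(line_to)
-- 	if length_f==0 or length_t==0:
-- 		return res
-- 	j=0
-- 	start_p=0
-- 	while start_p<length_f and line_from[start_p]<line_to[0]:
-- 		start_p+=1
-- 	for i in range(start_p+1,length_f):
-- 		t=line_from[i]
-- 		v=round(t-line_from[i-1],n_dig)
-- 		while j+1<length_t and line_to[j+1]<t: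
-- 			j+=1
-- 		#TODO: finish setting
-- 		if j==length_t:
-- 			break
-- 		res.append((v,round(t-line_to[j],n_dig)))
-- 	return res
-- ===== SOURCE B (Python) =====
-- def cal_dif_pair(line_from, line_to, n_dig=4):
--     if not line_from or not line_to:
--         return []
--     m = len(line_to)
--     start_p = next((i for i, x in enumerate(line_from) if x >= line_to[0]), len(line_from))
--     ts = line_from[start_p + 1:]
--     # Loop inversion: sweep line_to ONCE; at each position k hand out index k to
--     # every pending target t that settles there (next gap >= t, or end of list).
--     js = []
--     i = 0
--     for k in range(m):
--         while i < len(ts) and (k + 1 == m or line_to[k + 1] >= ts[i]):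
--             js.append(k)
--             i += 1
--     return [(round(t - p, n_dig), round(t - line_to[j], n_dig))
--             for p, t, j in zip(line_from[start_p:], ts, js)]
-- ===== Notes on version B (the rewrite author's own statement) =====
-- stated objective: alternative
-- what changed: Inverts the loops into staged passes: instead of A's for over line_from with an inner while-pointer carried across iterations, B sweeps line_to once, handing out each position k to every pending target that settles there (building the whole index list js in one pass), and then builds the result with a zip comprehension over the three streams.
import Mathlib
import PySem

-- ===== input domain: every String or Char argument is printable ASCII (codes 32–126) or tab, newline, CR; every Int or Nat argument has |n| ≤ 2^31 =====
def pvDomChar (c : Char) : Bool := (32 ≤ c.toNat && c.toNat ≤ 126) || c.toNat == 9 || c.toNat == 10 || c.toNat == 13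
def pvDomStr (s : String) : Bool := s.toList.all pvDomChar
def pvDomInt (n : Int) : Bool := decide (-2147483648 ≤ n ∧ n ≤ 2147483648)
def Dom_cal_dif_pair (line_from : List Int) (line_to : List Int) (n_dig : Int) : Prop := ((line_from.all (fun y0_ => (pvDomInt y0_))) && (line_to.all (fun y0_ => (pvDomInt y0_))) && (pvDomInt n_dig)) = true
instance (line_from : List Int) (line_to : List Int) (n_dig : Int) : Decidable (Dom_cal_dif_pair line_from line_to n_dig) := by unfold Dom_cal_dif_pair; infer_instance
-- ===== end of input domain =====

-- B inverts the loops into staged passes (one sweep of line_to hands out all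
-- indices, then a zip comprehension); same return value on every input.

-- ===== PORT A =====
-- Shared port of Python's round(x, n) on ints: identity for n ≥ 0, else round
-- half-to-even to a multiple of 10^(-n).  The exponent is capped at 12, which is
-- exact for |x| ≤ 2^32 (Dom bounds every element by 2^31, so every rounded
-- difference satisfies this; 10^12 > 2·2^32, making the result 0 either way).
def pyRound (x : Int) (n : Int) : Int :=
  if 0 ≤ n then x
  else
    let m : Int := (10 : Int) ^ (min (-n).toNat 12)
    let q : Int := Int.fdiv x m
    let r : Int := x - q * m
    if 2 * r < m then q * m
    else if m < 2 * r then (q + 1) * m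
    else if q % 2 = 0 then q * m else (q + 1) * m

-- A: the leading 'while start_p<length_f and line_from[start_p]<line_to[0]' loop.
def pvStartLoop (lf : List Int) (t0 : Int) (p : Nat) : Nat :=
  if p < lf.length ∧ lf.getD p 0 < t0 then pvStartLoop lf t0 (p+1) else p
termination_by lf.length - p
decreasing_by omega

-- A: the inner 'while j+1<length_t and line_to[j+1]<t' loop.
def pvAdvance (lt : List Int) (t : Int) (j : Nat) : Nat :=
  if j+1 < lt.length ∧ lt.getD (j+1) 0 < t then pvAdvance lt t (j+1) else j
termination_by lt.length - j
decreasing_by omega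

-- A: the 'for i in range(start_p+1,length_f)' loop carrying j and res.
def pvForLoop (lf : List Int) (lt : List Int) (nd : Int) (i : Nat) (j : Nat)
    (res : List (Int × Int)) : List (Int × Int) :=
  if i < lf.length then
    let t := lf.getD i 0
    let v := pyRound (t - lf.getD (i-1) 0) nd
    let j' := pvAdvance lt t j
    if j' = lt.length then res
    else pvForLoop lf lt nd (i+1) j' (res ++ [(v, pyRound (t - lt.getD j' 0) nd)])
  else res
termination_by lf.length - i
decreasing_by omega

def cal_dif_pair (line_from : List Int) (line_to : List Int) (n_dig : Int) : List (Int × Int) :=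
  if line_from.length = 0 ∨ line_to.length = 0 then []
  else pvForLoop line_from line_to n_dig (pvStartLoop line_from (line_to.getD 0 0) 0 + 1) 0 []

-- ===== PORT B =====
-- Source B's index sweep: 'for k in range(m): while i < len(ts) and (k+1 == m or
-- line_to[k+1] >= ts[i]): js.append(k); i += 1' — the tail recursion on (k, pending
-- targets) is the direct rendering of that nested for/while (k is the for index,
-- the pending suffix of ts plays the role of i).
def pvSweep (lt : List Int) (k : Nat) (ts : List Int) : List Nat :=
  if k < lt.length then
    match ts with
    | [] => []
    | t :: rest =>
        if k + 1 = lt.length ∨ t ≤ lt.getD (k+1) 0 then k :: pvSweep lt k rest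
        else pvSweep lt (k+1) (t :: rest)
  else []
termination_by (lt.length - k, ts.length)
decreasing_by all_goals simp_wf <;> omega

def cal_dif_pair_alt (line_from : List Int) (line_to : List Int) (n_dig : Int) : List (Int × Int) :=
  if line_from = [] ∨ line_to = [] then []
  else
    -- next((i for i, x in enumerate(line_from) if x >= line_to[0]), len(line_from))
    let start_p := line_from.findIdx (fun x => line_to.getD 0 0 ≤ x)
    let ts := line_from.drop (start_p + 1)
    let js := pvSweep line_to 0 ts
    -- [( … ) for p, t, j in zip(line_from[start_p:], ts, js)]
    ((line_from.drop start_p).zip (ts.zip js)).map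
      (fun ptj => (pyRound (ptj.2.1 - ptj.1) n_dig,
                   pyRound (ptj.2.1 - line_to.getD ptj.2.2 0) n_dig))

-- ===== PRECONDITION & SPEC =====
-- (no Pre_: the Python A returns normally on every input, and A = B everywhere)
def Spec_cal_dif_pair (line_from : List Int) (line_to : List Int) (n_dig : Int) (out : List (Int × Int)) : Prop := out = cal_dif_pair_alt line_from line_to n_dig
instance (line_from : List Int) (line_to : List Int) (n_dig : Int) (out : List (Int × Int)) : Decidable (Spec_cal_dif_pair line_from line_to n_dig out) := by unfold Spec_cal_dif_pair; infer_instance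

-- ===== CLAIM (what is proved, stated in full; the proofs are below) =====
def Claim_equal_cal_dif_pair : Prop := ∀ (line_from : List Int) (line_to : List Int) (n_dig : Int), Dom_cal_dif_pair line_from line_to n_dig → Spec_cal_dif_pair line_from line_to n_dig (cal_dif_pair line_from line_to n_dig)

-- ===== LEMMAS AND PROOFS =====

-- the trajectory of A's carried pointer over a stream of targets
def pvTraj (lt : List Int) (j : Nat) (ts : List Int) : List Nat :=
  match ts with
  | [] => []
  | t :: rest => pvAdvance lt t j :: pvTraj lt (pvAdvance lt t j) rest

-- A's leading while-loop equals findIdx of the first element ≥ t0.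
theorem pvStartLoop_eq (lf : List Int) (t0 : Int) (p : Nat) :
    pvStartLoop lf t0 p = p + (lf.drop p).findIdx (fun x => t0 ≤ x) := by
  rw [pvStartLoop]
  split
  · next h =>
    obtain ⟨hp, hlt⟩ := h
    rw [pvStartLoop_eq lf t0 (p+1)]
    rw [show lf.drop p = lf.getD p 0 :: lf.drop (p+1) by
      rw [List.getD_eq_getElem lf 0 hp]; exact List.drop_eq_getElem_cons hp]
    rw [List.findIdx_cons]
    have : decide (t0 ≤ lf.getD p 0) = false := by rw [decide_eq_false_iff_not]; omega
    rw [this]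
    simp [Nat.add_assoc, Nat.add_comm 1]
  · next h =>
    by_cases hp : p < lf.length
    · have hge : ¬ lf.getD p 0 < t0 := fun hc => h ⟨hp, hc⟩
      rw [show lf.drop p = lf.getD p 0 :: lf.drop (p+1) by
        rw [List.getD_eq_getElem lf 0 hp]; exact List.drop_eq_getElem_cons hp]
      rw [List.findIdx_cons]
      have : decide (t0 ≤ lf.getD p 0) = true := by rw [decide_eq_true_eq]; omega
      rw [this]
      simp
    · rw [List.drop_eq_nil_of_le (by omega)]
      simp
termination_by lf.length - p
decreasing_by omega

-- A's inner while-loop stays below lt.length.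
theorem pvAdvance_lt (lt : List Int) (t : Int) (j : Nat) (hj : j < lt.length) :
    pvAdvance lt t j < lt.length := by
  rw [pvAdvance]
  split
  · next h => exact pvAdvance_lt lt t (j+1) h.1
  · exact hj
termination_by lt.length - j
decreasing_by omega

-- B's single sweep of line_to produces exactly the trajectory of A's carried pointer.
theorem pvTraj_cons (lt : List Int) (j : Nat) (t : Int) (rest : List Int) :
    pvTraj lt j (t :: rest) = pvAdvance lt t j :: pvTraj lt (pvAdvance lt t j) rest := rfl

theorem pvSweep_eq_traj (lt : List Int) (k : Nat) (ts : List Int) (hk : k < lt.length) :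
    pvSweep lt k ts = pvTraj lt k ts := by
  rw [pvSweep.eq_def, if_pos hk]
  match ts with
  | [] => rfl
  | t :: rest =>
    dsimp only
    by_cases hstop : k + 1 = lt.length ∨ t ≤ lt.getD (k+1) 0
    · rw [if_pos hstop]
      have hadv : pvAdvance lt t k = k := by
        rw [pvAdvance, if_neg (by omega)]
      rw [pvSweep_eq_traj lt k rest hk, pvTraj_cons, hadv]
    · rw [if_neg hstop]
      push_neg at hstop
      have hadv : pvAdvance lt t k = pvAdvance lt t (k+1) := by
        rw [pvAdvance, if_pos ⟨by omega, by omega⟩]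
      rw [pvSweep_eq_traj lt (k+1) (t :: rest) (by omega)]
      rw [pvTraj_cons, pvTraj_cons, hadv]
termination_by (lt.length - k, ts.length)
decreasing_by all_goals simp_wf <;> omega

-- A's for-loop equals the zip-map over (previous stream, target stream, trajectory).
theorem pvForLoop_eq_zip (lf lt : List Int) (nd : Int)
    (i : Nat) (hi : 1 ≤ i) (j : Nat) (hj : j < lt.length) (res : List (Int × Int)) :
    pvForLoop lf lt nd i j res =
      res ++ ((lf.drop (i-1)).zip ((lf.drop i).zip (pvTraj lt j (lf.drop i)))).map
        (fun ptj => (pyRound (ptj.2.1 - ptj.1) nd,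
                     pyRound (ptj.2.1 - lt.getD ptj.2.2 0) nd)) := by
  rw [pvForLoop]
  split
  · next hilen =>
    have hi1 : i - 1 < lf.length := by omega
    have hcons1 : lf.drop (i-1) = lf.getD (i-1) 0 :: lf.drop i := by
      rw [List.getD_eq_getElem lf 0 hi1, List.drop_eq_getElem_cons hi1,
        show (i-1)+1 = i by omega]
    have hcons2 : lf.drop i = lf.getD i 0 :: lf.drop (i+1) := by
      rw [List.getD_eq_getElem lf 0 hilen]; exact List.drop_eq_getElem_cons hilen
    have hjlt := pvAdvance_lt lt (lf.getD i 0) j hj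
    rw [if_neg (by omega)]
    rw [pvForLoop_eq_zip lf lt nd (i+1) (by omega) _ hjlt]
    simp only [Nat.add_sub_cancel]
    conv_rhs => rw [hcons1, hcons2, pvTraj_cons, List.zip_cons_cons, List.zip_cons_cons,
      List.map_cons]
    rw [← hcons2]
    simp
  · next hilen =>
    rw [List.drop_eq_nil_of_le (by omega : lf.length ≤ i)]
    simp [pvTraj]
termination_by lf.length - i
decreasing_by omega

-- ===== VERDICT (by name: the statement is the Claim_ definition above) =====
theorem cal_dif_pair_spec : Claim_equal_cal_dif_pair := by
  intro lf lt nd _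
  simp only [Spec_cal_dif_pair, cal_dif_pair, cal_dif_pair_alt]
  by_cases hf : lf = []
  · simp [hf]
  by_cases ht : lt = []
  · simp [ht]
  rw [if_neg (by simp [List.length_eq_zero_iff, hf, ht]), if_neg (by simp [hf, ht])]
  have hlt1 : 0 < lt.length := List.length_pos_iff.mpr ht
  have hstart : pvStartLoop lf (lt.getD 0 0) 0 = lf.findIdx (fun x => lt.getD 0 0 ≤ x) := by
    rw [pvStartLoop_eq lf (lt.getD 0 0) 0]; simp
  rw [hstart, pvForLoop_eq_zip lf lt nd _ (by omega) 0 hlt1 [],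
    pvSweep_eq_traj lt 0 _ hlt1]
  simp
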